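-- pv_equiv track=rewrite | github.com/KaiboLiu/Algorithm_Online_Judge | codeJam/2018/kickstart/A.py | A_nines_1
-- ===== SOURCE A (Python) =====
-- def check(n):
--     if n%9 == 0 or '9' in str(n): return True
--     else: return False
--
-- def A_nines_2(l):
--     if l == 0: return 0
--     s = str(l)
--     n, first = len(s), int(s[0])
--     if n == 1: return 2
--     left = pre[n] if first == 9 else first*pre[n-1]
--     right = A_nines_2(l - first * 10**(n-1))
--     return left + right
--
-- def A_nines_1(l):
--     if l < 9: return 0
--     if l < 10: return 1
--     tail = l % 10
--     Nines = 0
--     for i in range(l - tail, l):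
--         if check(i): Nines += 1
--     Nines += A_nines_2(l-tail)
--     return Nines
--
-- pre = [0,2, 28, 352, 4168, 47512, 527608, 5748472, 61736248, 655626232,
--         6900636088, 72105724792, 748951523128, 7740563708152, 79665073373368,
--         816985660360312, 8352870943242808, 85175838489185272, 866582546402667448]
-- ===== SOURCE B (Python) =====
-- pre = [0, 2, 28, 352, 4168, 47512, 527608, 5748472, 61736248, 655626232,
--        6900636088, 72105724792, 748951523128, 7740563708152, 79665073373368,
--        816985660360312, 8352870943242808, 85175838489185272, 866582546402667448]
--
-- def A_nines_1(l):
--     if l < 9: return 0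
--     if l < 10: return 1
--     tail = l % 10
--     base = l - tail
--     # iterative digit scan of base (least significant digit first) replaces
--     # the string-based recursion of A_nines_2
--     total = 0
--     has9 = False
--     m, p = base, 0
--     while m:
--         d = m % 10
--         if d == 9:
--             has9 = True
--             total += pre[p + 1]
--         elif d:
--             total += d * pre[p]
--         m //= 10
--         p += 1
--     # the partial decade [base, l): every i there has base's digits plus a
--     # units digit < 9, so '9' appears iff base contains a 9; otherwise at
--     # most one multiple of 9 fits in the window
--     if has9:
--         total += tail
--     elif (-base) % 9 < tail:
--         total += 1
--     return total
-- ===== Notes on version B (the rewrite author's own statement) =====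
-- stated objective: alternative
-- what changed: B replaces A's string-based recursive digit DP (A_nines_2: str/len/int of the leading digit at every level) and A's brute-force check() loop over the last partial decade by a single least-significant-first arithmetic digit scan of the rounded-down bound plus a closed-form count for the partial decade; B uses no string conversion and no recursion.
import Mathlib
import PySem

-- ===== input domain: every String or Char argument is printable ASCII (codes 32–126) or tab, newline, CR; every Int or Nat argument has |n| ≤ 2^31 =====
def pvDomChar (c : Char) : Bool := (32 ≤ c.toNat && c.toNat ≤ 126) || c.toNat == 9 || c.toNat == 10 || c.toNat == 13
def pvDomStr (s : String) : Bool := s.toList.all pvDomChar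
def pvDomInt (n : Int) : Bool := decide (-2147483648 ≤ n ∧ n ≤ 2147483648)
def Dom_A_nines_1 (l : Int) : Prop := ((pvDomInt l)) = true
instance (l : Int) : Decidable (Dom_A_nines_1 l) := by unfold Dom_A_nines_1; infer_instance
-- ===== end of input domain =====

-- B replaces A's string-based recursive digit DP and brute tail loop by an
-- arithmetic least-significant-first digit scan plus a closed-form tail count.

-- ===== PORT A =====
def pvPre : List Int := [0, 2, 28, 352, 4168, 47512, 527608, 5748472, 61736248, 655626232,
  6900636088, 72105724792, 748951523128, 7740563708152, 79665073373368,
  816985660360312, 8352870943242808, 85175838489185272, 866582546402667448]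

def pvCheck (n : Int) : Bool :=
  if PySem.Int.mod n 9 == 0 || PySem.Str.isIn "9" (PySem.Int.toStr n) then true else false

-- A_nines_2, fuel-guarded recursion (fuel 20 exceeds the digit count of any |l| ≤ 2^31)
def pvA2 : Nat → Int → Int
  | 0, _ => 0
  | fuel+1, l =>
    if l == 0 then 0
    else
      let s := PySem.Int.toChars l
      let n := s.length
      let first := (PySem.Int.ofChars? [s.headD '0']).getD 0  -- int(s[0]); s ≠ [] since l ≠ 0
      if n == 1 then 2
      else
        let left := if first == 9 then pvPre.getD n 0 else first * pvPre.getD (n-1) 0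
        let right := pvA2 fuel (l - first * 10 ^ (n - 1))
        left + right

def A_nines_1 (l : Int) : Int :=
  if l < 9 then 0
  else if l < 10 then 1
  else
    let tail := PySem.Int.mod l 10
    let nines := (PySem.List.pyRange (l - tail) l 1).foldl
      (fun acc i => if pvCheck i then acc + 1 else acc) 0
    nines + pvA2 20 (l - tail)

-- ===== PORT B =====
def pvPreB : List Int := [0, 2, 28, 352, 4168, 47512, 527608, 5748472, 61736248, 655626232,
  6900636088, 72105724792, 748951523128, 7740563708152, 79665073373368,
  816985660360312, 8352870943242808, 85175838489185272, 866582546402667448]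

-- Source B's while loop over m, p, (total, has9); fuel 40 exceeds the digit count of any |l| ≤ 2^31
def pvScan : Nat → Int → Nat → Int × Bool → Int × Bool
  | 0, _, _, st => st
  | fuel+1, m, p, (total, has9) =>
    if m == 0 then (total, has9)
    else
      let d := PySem.Int.mod m 10
      let st := if d == 9 then (total + pvPreB.getD (p+1) 0, true)
                else if d == 0 then (total, has9)
                else (total + d * pvPreB.getD p 0, has9)
      pvScan fuel (PySem.Int.floordiv m 10) (p+1) st

def A_nines_1_alt (l : Int) : Int :=
  if l < 9 then 0
  else if l < 10 then 1
  else
    let tail := PySem.Int.mod l 10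
    let base := l - tail
    let st := pvScan 40 base 0 (0, false)
    if st.2 then st.1 + tail
    else if PySem.Int.mod (-base) 9 < tail then st.1 + 1
    else st.1

-- ===== PRECONDITION & SPEC =====
def Spec_A_nines_1 (l : Int) (out : Int) : Prop := out = A_nines_1_alt l
instance (l : Int) (out : Int) : Decidable (Spec_A_nines_1 l out) := by unfold Spec_A_nines_1; infer_instance

-- ===== CLAIM (what is proved, stated in full; the proofs are below) =====
def Claim_equal_A_nines_1 : Prop := ∀ (l : Int), Dom_A_nines_1 l → Spec_A_nines_1 l (A_nines_1 l)

-- ===== LEMMAS AND PROOFS =====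

-- the per-digit contribution of A's table lookup (d at decimal position p)
def pvContrib (d p : Nat) : Int :=
  if d = 0 then 0 else if d = 9 then pvPre.getD (p+1) 0 else (d : Int) * pvPre.getD p 0

-- sum of contributions of a little-endian digit list starting at position p
def pvGsum : List Nat → Nat → Int
  | [], _ => 0
  | d :: ds, p => pvContrib d p + pvGsum ds (p+1)

-- `Nat.toDigits` (what `str` prints for naturals) is the reversed digit list






-- adding a single leading digit adds its contribution



theorem pv_toDigitsCore_eq (fuel : Nat) : ∀ (m : Nat) (ds : List Char), 0 < m → m < 10 ^ fuel →
    Nat.toDigitsCore 10 fuel m ds = ((Nat.digits 10 m).map Nat.digitChar).reverse ++ ds := by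
  induction fuel with
  | zero => intro m ds hm hlt; simp at hlt; omega
  | succ f ih =>
    intro m ds hm hlt
    rw [Nat.digits_def' (by norm_num : (1:Nat) < 10) hm]
    simp only [Nat.toDigitsCore, List.map_cons, List.reverse_cons]
    by_cases h0 : m / 10 = 0
    · simp [h0]
    · rw [if_neg h0, ih (m / 10) _ (Nat.pos_of_ne_zero h0)
        (Nat.div_lt_of_lt_mul (by rw [pow_succ] at hlt; omega))]
      simp

theorem pv_toDigits_eq (m : Nat) (hm : 0 < m) :
    Nat.toDigits 10 m = ((Nat.digits 10 m).map Nat.digitChar).reverse := by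
  have h : m < 10 ^ (m + 1) :=
    lt_of_lt_of_le (Nat.lt_pow_self (by norm_num)) (Nat.pow_le_pow_right (by norm_num) (by omega))
  rw [Nat.toDigits, pv_toDigitsCore_eq (m+1) m [] hm h, List.append_nil]

theorem pv_toChars_natCast (m : Nat) :
    PySem.Int.toChars (m : Int) = Nat.toDigits 10 m := by
  simp [PySem.Int.toChars]

theorem pv_digitChar_eq_nine_iff (d : Nat) (hd : d < 10) : Nat.digitChar d = '9' ↔ d = 9 := by
  interval_cases d <;> simp [Nat.digitChar]

theorem pv_parse_digitChar (d : Nat) (hd : d < 10) :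
    (PySem.Int.ofChars? [Nat.digitChar d]).getD 0 = (d : Int) := by
  interval_cases d <;> decide

theorem pv_getLast_digits (m : Nat) (hm : 0 < m) (h : Nat.digits 10 m ≠ []) :
    (Nat.digits 10 m).getLast h = m / 10 ^ ((Nat.digits 10 m).length - 1) := by
  induction m using Nat.strong_induction_on with
  | _ m ih =>
    rcases Nat.lt_or_ge m 10 with hlt | hge
    · have hd : Nat.digits 10 m = [m] := Nat.digits_of_lt 10 m (by omega) hlt
      simp only [hd, List.getLast_singleton, List.length_cons, List.length_nil]
      simp
    · have h10 : (1:Nat) < 10 := by norm_num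
      have hq : 0 < m / 10 := Nat.div_pos hge (by norm_num)
      have hd := Nat.digits_def' h10 hm
      have hq_ne : Nat.digits 10 (m / 10) ≠ [] := Nat.digits_ne_nil_iff_ne_zero.mpr (by omega)
      simp only [hd]
      rw [List.getLast_cons hq_ne, ih (m / 10) (Nat.div_lt_self hm (by norm_num)) hq hq_ne]
      have hlen : 0 < (Nat.digits 10 (m / 10)).length := List.length_pos_iff.mpr hq_ne
      rw [Nat.div_div_eq_div_mul]
      congr 1
      · simp only [List.length_cons]
        rw [← pow_succ']
        congr 1
        omega

theorem pv_mod_natCast (m k : Nat) : PySem.Int.mod (m : Int) (k : Int) = ((m % k : Nat) : Int) := by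
  simp [PySem.Int.mod, Int.fmod_eq_emod]

theorem pv_fdiv_natCast (m k : Nat) : PySem.Int.floordiv (m : Int) (k : Int) = ((m / k : Nat) : Int) := by
  simp [PySem.Int.floordiv, Int.fdiv_eq_ediv]

theorem pv_gsum_add_pow (k : Nat) : ∀ (m' d p : Nat), m' < 10 ^ k → d ≠ 0 → d < 10 →
    pvGsum (Nat.digits 10 (m' + d * 10 ^ k)) p
      = pvGsum (Nat.digits 10 m') p + pvContrib d (p + k) := by
  induction k with
  | zero =>
    intro m' d p hm hd0 hd10
    have : m' = 0 := by omega
    subst this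
    simp only [pow_zero, Nat.mul_one, Nat.zero_add]
    rw [Nat.digits_of_lt 10 d hd0 hd10]
    simp [pvGsum]
  | succ k ih =>
    intro m' d p hm hd0 hd10
    have hN : 0 < m' + d * 10 ^ (k+1) := by positivity
    have hmod : (m' + d * 10 ^ (k+1)) % 10 = m' % 10 := by
      rw [pow_succ, ← Nat.mul_assoc, Nat.add_mul_mod_self_right]
    have hdiv : (m' + d * 10 ^ (k+1)) / 10 = m' / 10 + d * 10 ^ k := by
      rw [pow_succ, ← Nat.mul_assoc, Nat.add_mul_div_right _ _ (by norm_num : (0:Nat) < 10)]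
    rw [Nat.digits_def' (by norm_num : (1:Nat) < 10) hN, hmod, hdiv]
    by_cases h0 : m' = 0
    · subst h0
      simp only [Nat.zero_mod, Nat.zero_div, Nat.digits_zero, pvGsum, Nat.zero_add]
      rw [show (0:Nat) + d * 10 ^ k = 0 + d * 10 ^ k from rfl] at *
      have := ih 0 d (p+1) (by positivity) hd0 hd10
      simp only [Nat.zero_add] at this
      rw [this]
      simp [pvGsum, pvContrib]
      ring_nf
    · have hm' : 0 < m' := Nat.pos_of_ne_zero h0
      rw [Nat.digits_def' (by norm_num : (1:Nat) < 10) hm']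
      simp only [pvGsum]
      rw [ih (m' / 10) d (p+1) (Nat.div_lt_of_lt_mul (by rw [pow_succ] at hm; omega)) hd0 hd10]
      ring_nf

theorem pv_mod_ten (m : Nat) : PySem.Int.mod (m : Int) 10 = ((m % 10 : Nat) : Int) := by
  exact_mod_cast pv_mod_natCast m 10

theorem pv_fdiv_ten (m : Nat) : PySem.Int.floordiv (m : Int) 10 = ((m / 10 : Nat) : Int) := by
  exact_mod_cast pv_fdiv_natCast m 10

-- A's recursive DP computes the digit-contribution sum (on multiples of 10)
theorem pv_A2_eq (m : Nat) : 10 ∣ m → ∀ fuel, (Nat.digits 10 m).length ≤ fuel →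
    pvA2 fuel (m : Int) = pvGsum (Nat.digits 10 m) 0 := by
  induction m using Nat.strong_induction_on with
  | _ m ih =>
    intro hdvd fuel hfuel
    by_cases h0 : m = 0
    · subst h0
      cases fuel <;> simp [pvA2, pvGsum]
    · have hm : 0 < m := Nat.pos_of_ne_zero h0
      have hge : 10 ≤ m := Nat.le_of_dvd hm hdvd
      have hne : Nat.digits 10 m ≠ [] := Nat.digits_ne_nil_iff_ne_zero.mpr h0
      set n := (Nat.digits 10 m).length with hn
      have hn2 : 2 ≤ n := by
        by_contra hc
        have hle : (Nat.digits 10 m).length ≤ 1 := by omega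
        rw [Nat.digits_length_le_iff (by norm_num) m] at hle
        omega
      obtain ⟨f, rfl⟩ : ∃ f, fuel = f + 1 := ⟨fuel - 1, by omega⟩
      have hlt : m < 10 ^ n := Nat.lt_base_pow_length_digits (by norm_num)
      have hge_pow : 10 ^ (n-1) ≤ m := by
        by_contra hc
        rw [Nat.not_le] at hc
        rw [← Nat.digits_length_le_iff (by norm_num) m] at hc
        omega
      have hD10 : m / 10 ^ (n-1) < 10 := by
        apply Nat.div_lt_of_lt_mul
        calc m < 10 ^ n := hlt
          _ = 10 ^ (n-1) * 10 := by rw [← pow_succ]; congr 1; omega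
      have hlast : (Nat.digits 10 m).getLast hne = m / 10 ^ (n-1) := pv_getLast_digits m hm hne
      have hD0 : m / 10 ^ (n-1) ≠ 0 := by
        have hgl := Nat.getLast_digit_ne_zero 10 h0
        rwa [pv_getLast_digits m hm hne] at hgl
      -- the characters of str(m)
      have hchars : PySem.Int.toChars (m : Int) = ((Nat.digits 10 m).map Nat.digitChar).reverse := by
        rw [pv_toChars_natCast, pv_toDigits_eq m hm]
      have hhead : (((Nat.digits 10 m).map Nat.digitChar).reverse).headD '0'
          = Nat.digitChar ((Nat.digits 10 m).getLast hne) := by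
        rw [List.headD_eq_head?, List.head?_reverse, List.getLast?_map,
          List.getLast?_eq_some_getLast (h := hne)]
        rfl
      have hfirst : (PySem.Int.ofChars? [(((Nat.digits 10 m).map Nat.digitChar).reverse).headD '0']).getD 0
          = ((m / 10 ^ (n-1) : Nat) : Int) := by
        rw [hhead, hlast]
        exact pv_parse_digitChar _ hD10
      -- the remainder after stripping the leading digit
      set m' := m % 10 ^ (n-1) with hm'
      have hsplit : 10 ^ (n-1) * (m / 10 ^ (n-1)) + m' = m := Nat.div_add_mod m _
      have hm'lt : m' < 10 ^ (n-1) := Nat.mod_lt _ (by positivity)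
      have harg : (m : Int) - ((m / 10 ^ (n-1) : Nat) : Int) * (10:Int) ^ (n-1) = (m' : Int) := by
        have hcast : ((10:Int)) ^ (n-1) = ((10 ^ (n-1) : Nat) : Int) := by push_cast; ring
        have hsplitZ : ((10 ^ (n-1) : Nat) : Int) * ((m / 10 ^ (n-1) : Nat) : Int)
            + ((m' : Nat) : Int) = (m : Int) := by exact_mod_cast hsplit
        rw [hcast]
        linarith [hsplitZ, mul_comm ((10 ^ (n-1) : Nat) : Int) ((m / 10 ^ (n-1) : Nat) : Int)]
      have hdvd' : 10 ∣ m' :=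
        (Nat.dvd_mod_iff (dvd_pow_self 10 (by omega : n - 1 ≠ 0))).mpr hdvd
      have hih := ih m' (by omega) hdvd' f (by
        have := (Nat.digits_length_le_iff (by norm_num : (1:Nat) < 10) m').mpr hm'lt
        omega)
      -- evaluate one step of pvA2
      simp only [pvA2, hchars, List.length_reverse, List.length_map, ← hn]
      rw [if_neg (by simp [h0]), if_neg (by simp; omega), hfirst, harg, hih]
      -- compare with the digit-sum characterisation
      have hg := pv_gsum_add_pow (n-1) m' (m / 10 ^ (n-1)) 0 hm'lt hD0 hD10
      rw [show m' + (m / 10 ^ (n-1)) * 10 ^ (n-1) = m by rw [mul_comm]; omega] at hg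
      rw [hg, pvContrib, if_neg hD0]
      by_cases hD9 : m / 10 ^ (n-1) = 9
      · rw [if_pos (by simp [hD9]), if_pos hD9]
        rw [show 0 + (n-1) + 1 = n by omega]
        ring
      · rw [if_neg (by simp only [beq_iff_eq]; exact_mod_cast hD9), if_neg hD9]
        rw [show 0 + (n-1) = n - 1 by omega]
        ring

-- B's scan computes the digit-contribution sum and the digit-9 flag
theorem pv_scan_eq (fuel : Nat) : ∀ (m : Nat) (p : Nat) (t : Int) (h : Bool),
    (Nat.digits 10 m).length ≤ fuel →
    pvScan fuel (m : Int) p (t, h)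
      = (t + pvGsum (Nat.digits 10 m) p, h || decide (9 ∈ Nat.digits 10 m)) := by
  induction fuel with
  | zero =>
    intro m p t h hlen
    rw [Nat.digits_length_le_iff (by norm_num) m] at hlen
    have hz : m = 0 := by omega
    subst hz
    simp [pvScan, pvGsum]
  | succ f ih =>
    intro m p t h hlen
    by_cases h0 : m = 0
    · subst h0; simp [pvScan, pvGsum]
    · have hm : 0 < m := Nat.pos_of_ne_zero h0
      have hd := Nat.digits_def' (by norm_num : (1:Nat) < 10) hm
      have hlen' : (Nat.digits 10 (m / 10)).length ≤ f := by
        rw [hd] at hlen; simpa using hlen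
      simp only [pvScan]
      rw [if_neg (by simp [h0]), pv_mod_ten m, pv_fdiv_ten m, hd]
      by_cases h9 : m % 10 = 9
      · rw [h9, if_pos (by norm_num), ih (m/10) (p+1) _ _ hlen']
        simp [pvGsum, pvContrib, pvPreB, pvPre]
        ring
      · by_cases hz : m % 10 = 0
        · rw [hz, if_neg (by norm_num), if_pos (by norm_num), ih (m/10) (p+1) _ _ hlen']
          simp [pvGsum, pvContrib]
        · rw [if_neg (by simp only [beq_iff_eq]; exact_mod_cast h9),
            if_neg (by simp only [beq_iff_eq]; exact_mod_cast hz),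
            ih (m/10) (p+1) _ _ hlen']
          simp [pvGsum, pvContrib, hz, h9, pvPreB, pvPre,
            (show (9:Nat) ≠ m % 10 from fun hc => h9 hc.symm)]
          ring

theorem pv_isIn_nine (m : Nat) (hm : 0 < m) :
    PySem.Str.isIn "9" (PySem.Int.toStr (m : Int)) = decide (9 ∈ Nat.digits 10 m) := by
  have h1 : PySem.Str.isIn "9" (PySem.Int.toStr (m : Int))
      = PySem.Chars.isIn ['9'] (PySem.Int.toChars (m : Int)) := by
    rw [PySem.Str.isIn_eq, PySem.Int.toList_toStr]
    rfl
  rw [h1, pv_toChars_natCast, pv_toDigits_eq m hm, Bool.eq_iff_iff,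
    PySem.Chars.isIn_iff_infix, List.singleton_infix_iff]
  simp only [List.mem_reverse, List.mem_map, decide_eq_true_eq]
  constructor
  · rintro ⟨d, hd, hchar⟩
    have hlt : d < 10 := Nat.digits_lt_base (by norm_num) hd
    rwa [← (pv_digitChar_eq_nine_iff d hlt).mp hchar]
  · intro h9
    exact ⟨9, h9, rfl⟩

theorem pv_check_window (b k : Nat) (hb : 0 < b) (h10 : 10 ∣ b) (hk : k < 9) :
    pvCheck ((b : Int) + (k : Int))
      = (decide ((9 : Int) ∣ ((b : Int) + (k : Int))) || decide (9 ∈ Nat.digits 10 b)) := by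
  have hcast : (b : Int) + (k : Int) = ((b + k : Nat) : Int) := by push_cast; ring
  have hbk : 0 < b + k := by omega
  have hmem : (9 ∈ Nat.digits 10 (b + k)) ↔ (9 ∈ Nat.digits 10 b) := by
    have hmod : (b + k) % 10 = k := by omega
    have hdiv : (b + k) / 10 = b / 10 := by omega
    have hb0 : b % 10 = 0 := by omega
    rw [Nat.digits_def' (by norm_num : (1:Nat) < 10) hbk, hmod, hdiv,
        Nat.digits_def' (by norm_num : (1:Nat) < 10) hb, hb0]
    have hne : (9:Nat) ≠ k := by omega
    simp [List.mem_cons, hne]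
  have hdvdeq : (PySem.Int.mod ((b : Int) + (k : Int)) 9 == 0)
      = decide ((9 : Int) ∣ ((b : Int) + (k : Int))) := by
    rw [Bool.eq_iff_iff]
    simp [PySem.Int.mod_eq_zero_iff_dvd ((b : Int) + (k : Int)) 9]
  rw [pvCheck, hdvdeq]
  have hdec : decide (9 ∈ Nat.digits 10 (b + k)) = decide (9 ∈ Nat.digits 10 b) := by
    simp only [hmem]
  rw [hcast, pv_isIn_nine (b + k) hbk, hdec]
  rw [← hcast]
  split <;> simp_all

-- the partial decade [b, b+t)
set_option maxHeartbeats 2000000 in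
theorem pv_tail_count (b t : Nat) (hb : 0 < b) (h10 : 10 ∣ b) (ht : t ≤ 9) :
    ((PySem.List.pyRange (b : Int) ((b : Int) + (t : Int)) 1).foldl
        (fun acc i => if pvCheck i then acc + 1 else acc) 0 : Int)
      = if 9 ∈ Nat.digits 10 b then (t : Int)
        else if PySem.Int.mod (-(b : Int)) 9 < (t : Int) then 1 else 0 := by
  rw [PySem.List.foldl_if_add_one, zero_add, PySem.List.pyRange_one]
  have htn : ((b:Int) + t - b).toNat = t := by omega
  rw [htn, List.countP_map]
  have hco : ∀ k ∈ List.range t, (pvCheck ∘ fun k : Nat => (b:Int) + (k:Int)) k = true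
      ↔ ((fun k : Nat => decide ((9:Int) ∣ ((b:Int)+(k:Int))) || decide (9 ∈ Nat.digits 10 b)) k) = true := by
    intro k hkmem
    have hk : k < 9 := by
      have := List.mem_range.mp hkmem
      omega
    rw [Function.comp_apply, pv_check_window b k hb h10 hk]
  rw [List.countP_congr hco]
  by_cases hH : 9 ∈ Nat.digits 10 b
  · rw [if_pos hH, List.countP_congr (q := fun _ => true) (by intro k hk; simp [hH]),
      List.countP_true, List.length_range]
  · rw [if_neg hH, List.countP_congr (q := fun k : Nat => decide ((9:Int) ∣ ((b:Int)+(k:Int))))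
      (by intro k hk; simp [hH])]
    have hmod9 : PySem.Int.mod (-(b:Int)) 9 = (-(b:Int)) % 9 := by
      rw [PySem.Int.mod, Int.fmod_eq_emod]
      simp
    rw [hmod9]
    have key : ∀ s : Nat, s ≤ 9 →
        (((List.range s).countP (fun k : Nat => decide ((9:Int) ∣ ((b:Int)+(k:Int))))) : Int)
          = if (-(b:Int)) % 9 < (s:Int) then 1 else 0 := by
      intro s
      induction s with
      | zero =>
        intro _
        simp only [List.range_zero, List.countP_nil, Nat.cast_zero]
        rw [if_neg (by omega)]
      | succ u ih =>
        intro hu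
        rw [List.range_succ, List.countP_append, List.countP_singleton, Nat.cast_add,
          apply_ite (fun n : Nat => (n : Int)), ih (by omega)]
        simp only [decide_eq_true_eq, Nat.cast_one, Nat.cast_zero]
        push_cast
        split_ifs <;> omega
    exact key t ht

-- ===== VERDICT (by name: the statement is the Claim_ definition above) =====
theorem A_nines_1_spec : Claim_equal_A_nines_1 := by
  unfold Claim_equal_A_nines_1
  intro l hdom
  unfold Spec_A_nines_1
  by_cases h9 : l < 9
  · simp [A_nines_1, A_nines_1_alt, h9]
  · by_cases h10 : l < 10
    · simp [A_nines_1, A_nines_1_alt, h9, h10]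
    · have hl10 : 10 ≤ l := by omega
      have hdom' : l ≤ 2147483648 := by
        unfold Dom_A_nines_1 pvDomInt at hdom
        simp at hdom
        exact hdom.2
      have htail : PySem.Int.mod l 10 = l % 10 := by
        rw [PySem.Int.mod, Int.fmod_eq_emod]
        simp
      have hb0 : (0:Int) ≤ l - l % 10 := by omega
      set b : Nat := (l - l % 10).toNat with hbdef
      have hbcast : ((b : Nat) : Int) = l - l % 10 := by omega
      have hbpos : 0 < b := by omega
      have hdvd : (10:Nat) ∣ b := by omega
      set t : Nat := (l % 10).toNat with htdef
      have ht9 : t ≤ 9 := by omega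
      have htcast : ((t : Nat) : Int) = l % 10 := by omega
      have hsum : (b : Int) + (t : Int) = l := by omega
      have hbound : b < 10 ^ 20 := by
        have h1 : (10:Nat) ^ 20 = 100000000000000000000 := by norm_num
        omega
      have hlenA : (Nat.digits 10 b).length ≤ 20 :=
        (Nat.digits_length_le_iff (by norm_num) b).mpr hbound
      have hlenB : (Nat.digits 10 b).length ≤ 40 := by omega
      have hA2 := pv_A2_eq b hdvd 20 hlenA
      have hScan := pv_scan_eq 40 b 0 0 false hlenB
      have hCount := pv_tail_count b t hbpos hdvd ht9
      rw [A_nines_1, A_nines_1_alt, if_neg (by omega), if_neg (by omega),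
        if_neg (by omega), if_neg (by omega)]
      simp only [htail]
      rw [show l - l % 10 = ((b:Nat):Int) from hbcast.symm]
      rw [show l = (b:Int) + (t:Int) from hsum.symm]
      rw [show ((b:Int) + (t:Int)) % 10 = (t:Int) by omega]
      rw [hCount, hA2, hScan]
      simp only [Bool.false_or, zero_add]
      by_cases hH : 9 ∈ Nat.digits 10 b
      · rw [if_pos hH]
        simp only [hH, decide_true, if_true]
        ring
      · rw [if_neg hH]
        simp only [hH, decide_false, Bool.false_eq_true, if_false]
        by_cases hw : PySem.Int.mod (-(b:Int)) 9 < (t:Int)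
        · rw [if_pos hw, if_pos hw]
          ring
        · rw [if_neg hw, if_neg hw]
          ring
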